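-- pv_equiv track=rewrite | github.com/DengYijunX/tooltesting | app/workflows/problem_generation_workflow.py | _route_consistency_issues
-- ===== SOURCE A (Python) =====
-- from typing import Dict, Any, List
--
-- def _route_consistency_issues(issues: List[str]) -> str:
--     problem_markers = (
--         "problem_field_",
--         "sample_",
--     )
--     solution_markers = (
--         "reference_code_",
--         "solution_explanation_",
--     )
--
--     if any(issue.startswith(solution_markers) for issue in issues):
--         return "solution"
--     if any(issue.startswith(problem_markers) for issue in issues):
--         return "problem"
--     return "solution"
-- ===== SOURCE B (Python) =====
-- from typing import Dict, Any, List
--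
-- def _route_consistency_issues(issues: List[str]) -> str:
--     problem_markers = (
--         "problem_field_",
--         "sample_",
--     )
--     solution_markers = (
--         "reference_code_",
--         "solution_explanation_",
--     )
--     saw_problem = False
--     for issue in issues:
--         if issue.startswith(solution_markers):
--             return "solution"
--         if issue.startswith(problem_markers):
--             saw_problem = True
--     return "problem" if saw_problem else "solution"
-- ===== Notes on version B (the rewrite author's own statement) =====
-- stated objective: alternative
-- what changed: Replaced the two separate any(...) scans with a single early-exiting pass that returns 'solution' on the first solution marker and defers 'problem' via a flag.
import Mathlib
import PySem

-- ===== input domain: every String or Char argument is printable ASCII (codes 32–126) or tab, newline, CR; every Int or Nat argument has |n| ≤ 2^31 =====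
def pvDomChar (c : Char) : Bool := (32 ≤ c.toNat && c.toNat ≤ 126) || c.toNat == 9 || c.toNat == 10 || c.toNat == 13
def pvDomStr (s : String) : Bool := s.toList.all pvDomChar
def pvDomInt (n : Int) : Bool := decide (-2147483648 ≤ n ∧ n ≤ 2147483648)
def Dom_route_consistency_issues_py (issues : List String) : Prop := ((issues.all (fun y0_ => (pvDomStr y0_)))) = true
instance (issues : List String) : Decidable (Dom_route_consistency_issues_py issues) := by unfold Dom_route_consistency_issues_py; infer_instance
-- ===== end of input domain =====

-- ===== PORT A =====
-- Python tuple-startswith is ported as an ordered disjunction of PySem.Str.startswith.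
def pvSolMark (issue : String) : Bool :=
  PySem.Str.startswith issue "reference_code_" || PySem.Str.startswith issue "solution_explanation_"

def pvProbMark (issue : String) : Bool :=
  PySem.Str.startswith issue "problem_field_" || PySem.Str.startswith issue "sample_"

def route_consistency_issues_py (issues : List String) : String :=
  if issues.any (fun issue => pvSolMark issue) then "solution"
  else if issues.any (fun issue => pvProbMark issue) then "problem"
  else "solution"

-- ===== PORT B =====
-- B: one early-exiting pass with a deferred 'problem' flag.
def routeGo (issues : List String) (sawProblem : Bool) : String :=
  match issues with
  | [] => if sawProblem then "problem" else "solution"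
  | issue :: rest =>
    if pvSolMark issue then "solution"
    else routeGo rest (sawProblem || pvProbMark issue)

def route_consistency_issues_py_alt (issues : List String) : String :=
  routeGo issues false

-- ===== PRECONDITION & SPEC =====
def Spec_route_consistency_issues_py (issues : List String) (out : String) : Prop := out = route_consistency_issues_py_alt issues
instance (issues : List String) (out : String) : Decidable (Spec_route_consistency_issues_py issues out) := by unfold Spec_route_consistency_issues_py; infer_instance

-- ===== CLAIM (what is proved, stated in full; the proofs are below) =====
def Claim_equal_route_consistency_issues_py : Prop := ∀ (issues : List String), Dom_route_consistency_issues_py issues → Spec_route_consistency_issues_py issues (route_consistency_issues_py issues)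

-- ===== LEMMAS AND PROOFS =====

-- ===== VERDICT (by name: the statement is the Claim_ definition above) =====
theorem routeGo_char (issues : List String) (flag : Bool) :
    routeGo issues flag =
      if issues.any (fun i => pvSolMark i) then "solution"
      else if flag || issues.any (fun i => pvProbMark i) then "problem"
      else "solution" := by
  induction issues generalizing flag with
  | nil => simp [routeGo]
  | cons x xs ih =>
    simp only [routeGo, List.any_cons]
    by_cases hs : pvSolMark x
    · simp [hs]
    · simp only [hs, ih, Bool.false_or]
      by_cases hp : xs.any (fun i => pvSolMark i)
      · simp [hp]
      · simp [hp]
        by_cases hq : pvProbMark x <;> simp [hq]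

theorem route_consistency_issues_py_spec : Claim_equal_route_consistency_issues_py := by
  intro issues _
  unfold Spec_route_consistency_issues_py route_consistency_issues_py route_consistency_issues_py_alt
  rw [routeGo_char]
  simp
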